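-- pv_equiv track=rewrite | github.com/anushree1808/Natural-Language-Processing---USC-Assignemnts | calculatebleu3.py | clipped_counts
-- ===== SOURCE A (Python) =====
-- def clipped_counts(n_grams_c, refs_dict):
--     clip_count = 0
--
--     for key in n_grams_c.keys():
--         max_ref_count = 0
--         cand_count = n_grams_c[key]
--         for ref_dict in refs_dict:
--             #if key in ref_dict:
--             max_ref_count = max(max_ref_count,ref_dict.get(key,0))
--         clip_count += min(cand_count,max_ref_count)
--     return clip_count
-- ===== SOURCE B (Python) =====
-- def clipped_counts(n_grams_c, refs_dict):
--     # One pass over the references builds a max-count table, then one pass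
--     # over the candidate n-grams sums the clipped counts.
--     max_ref = {}
--     for ref_dict in refs_dict:
--         for k, v in ref_dict.items():
--             max_ref[k] = max(max_ref.get(k, 0), v)
--     return sum(min(v, max_ref.get(k, 0)) for k, v in n_grams_c.items())
-- ===== Notes on version B (the rewrite author's own statement) =====
-- stated objective: faster
-- what changed: Inverts the loop nesting: a single pass over the references precomputes a max-count table, so the per-candidate-key rescan of every reference disappears; candidate keys are then summed in one pass with a table lookup.
import Mathlib
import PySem

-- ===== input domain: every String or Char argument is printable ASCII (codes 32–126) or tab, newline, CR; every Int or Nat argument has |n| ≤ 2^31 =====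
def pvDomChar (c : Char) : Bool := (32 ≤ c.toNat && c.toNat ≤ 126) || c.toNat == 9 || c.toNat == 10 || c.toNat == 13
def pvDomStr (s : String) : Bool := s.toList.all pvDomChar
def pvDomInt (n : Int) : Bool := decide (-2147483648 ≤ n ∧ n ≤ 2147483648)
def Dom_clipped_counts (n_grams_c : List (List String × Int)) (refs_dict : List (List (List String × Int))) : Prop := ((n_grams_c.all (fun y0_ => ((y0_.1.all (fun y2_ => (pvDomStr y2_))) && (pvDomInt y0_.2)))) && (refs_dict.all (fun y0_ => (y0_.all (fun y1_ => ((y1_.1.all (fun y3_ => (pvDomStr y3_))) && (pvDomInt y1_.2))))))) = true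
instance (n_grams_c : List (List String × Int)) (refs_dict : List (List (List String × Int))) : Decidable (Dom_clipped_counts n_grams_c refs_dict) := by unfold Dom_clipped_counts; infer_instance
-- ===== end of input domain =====

-- B replaces A's per-candidate-key rescan of every reference by one precomputed
-- max-count table over the references plus a single summing pass (objective: faster).

-- ===== PORT A =====
-- the dict arguments arrive as association lists; as in Python, they are read as dicts
def clipped_counts (n_grams_c : List (List String × Int)) (refs_dict : List (List (List String × Int))) : Int :=
  let c := PySem.Dict.ofList n_grams_c
  let refs := refs_dict.map PySem.Dict.ofList
  c.keys.foldl (fun clip_count key =>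
    -- max_ref_count = 0; cand_count = n_grams_c[key]  (key ∈ keys, so the lookup succeeds)
    let cand_count := c.getD key 0
    let max_ref_count := refs.foldl (fun m ref_dict => max m (ref_dict.getD key 0)) 0
    clip_count + min cand_count max_ref_count) 0

-- ===== PORT B =====
def clipped_counts_alt (n_grams_c : List (List String × Int)) (refs_dict : List (List (List String × Int))) : Int :=
  let max_ref := refs_dict.foldl (fun acc ref_dict =>
      (PySem.Dict.ofList ref_dict).items.foldl
        (fun a p => a.modify p.1 0 (fun x => max x p.2)) acc)
    PySem.Dict.empty
  (PySem.Dict.ofList n_grams_c).items.foldl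
    (fun s p => s + min p.2 (max_ref.getD p.1 0)) 0

-- ===== PRECONDITION & SPEC =====
def Spec_clipped_counts (n_grams_c : List (List String × Int)) (refs_dict : List (List (List String × Int))) (out : Int) : Prop := out = clipped_counts_alt n_grams_c refs_dict
instance (n_grams_c : List (List String × Int)) (refs_dict : List (List (List String × Int))) (out : Int) : Decidable (Spec_clipped_counts n_grams_c refs_dict out) := by unfold Spec_clipped_counts; infer_instance

-- ===== CLAIM (what is proved, stated in full; the proofs are below) =====
def Claim_equal_clipped_counts : Prop := ∀ (n_grams_c : List (List String × Int)) (refs_dict : List (List (List String × Int))), Dom_clipped_counts n_grams_c refs_dict → Spec_clipped_counts n_grams_c refs_dict (clipped_counts n_grams_c refs_dict)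

-- ===== LEMMAS AND PROOFS =====

-- lookup in a literal association dict, cons step
theorem getD_mk_cons (p : List String × Int) (rest : List (List String × Int)) (k : List String) :
    (PySem.Dict.mk (p :: rest)).getD k 0 = if p.1 = k then p.2 else (PySem.Dict.mk rest).getD k 0 := by
  rw [PySem.Dict.getD_eq_get?_getD, PySem.Dict.get?_mk_cons]
  by_cases h : p.1 = k
  · simp [h]
  · simp [h, ← PySem.Dict.getD_eq_get?_getD]

-- one reference folded into the max table: the entry at k becomes max(old, ref[k] default 0)
theorem maxfold_getD (l : List (List String × Int)) (hnd : (l.map Prod.fst).Nodup)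
    (acc : PySem.Dict (List String) Int) (k : List String) (hacc : 0 ≤ acc.getD k 0) :
    (l.foldl (fun a p => a.modify p.1 0 (fun x => max x p.2)) acc).getD k 0
      = max (acc.getD k 0) ((PySem.Dict.mk l).getD k 0) := by
  induction l generalizing acc with
  | nil =>
    simp only [List.foldl_nil]
    have h0 : (PySem.Dict.mk ([] : List (List String × Int))).getD k 0 = 0 := rfl
    rw [h0]
    exact (max_eq_left hacc).symm
  | cons p rest ih =>
    have hnd' : p.1 ∉ rest.map Prod.fst ∧ (rest.map Prod.fst).Nodup := by
      simpa [List.nodup_cons] using hnd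
    simp only [List.foldl_cons]
    by_cases hk : p.1 = k
    · have hnotin : k ∉ rest.map Prod.fst := hk ▸ hnd'.1
      have hrest : (PySem.Dict.mk rest).getD k 0 = 0 := by
        clear hnd hnd' ih hacc
        induction rest with
        | nil => rfl
        | cons q tl ihq =>
          have h1 : q.1 ≠ k := fun e => hnotin (by simp [← e])
          have h2 : k ∉ tl.map Prod.fst := fun m => hnotin (by simp [m])
          rw [getD_mk_cons, if_neg h1]
          exact ihq h2
      have hge : 0 ≤ (acc.modify p.1 0 (fun x => max x p.2)).getD k 0 := by
        rw [PySem.Dict.getD_modify, if_pos hk.symm, hk]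
        exact le_max_of_le_left hacc
      rw [ih hnd'.2 _ hge, PySem.Dict.getD_modify, if_pos hk.symm, hrest,
        getD_mk_cons, if_pos hk, hk]
      exact max_eq_left (le_max_of_le_left hacc)
    · have hge : 0 ≤ (acc.modify p.1 0 (fun x => max x p.2)).getD k 0 := by
        rw [PySem.Dict.getD_modify, if_neg (fun h => hk h.symm)]
        exact hacc
      rw [ih hnd'.2 _ hge, PySem.Dict.getD_modify, if_neg (fun h => hk h.symm),
        getD_mk_cons, if_neg hk]

-- the whole table-building pass, read at k, is A's inner max loop over the references
theorem table_getD (refs_dict : List (List (List String × Int)))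
    (acc : PySem.Dict (List String) Int) (k : List String) (hacc : 0 ≤ acc.getD k 0) :
    (refs_dict.foldl (fun acc ref_dict =>
        (PySem.Dict.ofList ref_dict).items.foldl
          (fun a p => a.modify p.1 0 (fun x => max x p.2)) acc) acc).getD k 0
      = refs_dict.foldl (fun m ref_dict => max m ((PySem.Dict.ofList ref_dict).getD k 0))
          (acc.getD k 0) := by
  induction refs_dict generalizing acc with
  | nil => simp
  | cons r rest ih =>
    simp only [List.foldl_cons]
    have hnd : ((PySem.Dict.ofList r).items.map Prod.fst).Nodup := by
      have h := PySem.Dict.nodup_keys_ofList r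
      simpa [PySem.Dict.keys] using h
    have hmk : PySem.Dict.mk (PySem.Dict.ofList r).items = PySem.Dict.ofList r := rfl
    have hstep := maxfold_getD (PySem.Dict.ofList r).items hnd acc k hacc
    rw [hmk] at hstep
    rw [ih _ (by rw [hstep]; exact le_max_of_le_left hacc), hstep]

theorem clipped_counts_eq (n_grams_c : List (List String × Int))
    (refs_dict : List (List (List String × Int))) :
    clipped_counts n_grams_c refs_dict = clipped_counts_alt n_grams_c refs_dict := by
  unfold clipped_counts clipped_counts_alt
  dsimp only
  rw [PySem.Dict.items_eq_map_keys _ (PySem.Dict.nodup_keys_ofList _) 0, List.foldl_map]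
  congr 1
  funext s k
  dsimp only
  have ht := table_getD refs_dict PySem.Dict.empty k (by rw [PySem.Dict.getD_empty])
  rw [PySem.Dict.getD_empty] at ht
  rw [List.foldl_map, ht]

-- ===== VERDICT (by name: the statement is the Claim_ definition above) =====
theorem clipped_counts_spec : Claim_equal_clipped_counts := by
  intro n_grams_c refs_dict _
  exact clipped_counts_eq n_grams_c refs_dict
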